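-- pv_equiv track=rewrite | github.com/natiixnt/jolly-jesters-mvp | backend/app/utils/excel_reader.py | _context_currency_hint
-- ===== SOURCE A (Python) =====
-- from typing import Dict, List, Optional, Sequence
--
-- CONTEXT_HINTS = [
--     ("EUR", ["eur", "euro", "€", "eu", " eu"]),
--     ("USD", ["usd", "dolar", "usd$", "$"]),
--     ("CAD", ["cad", "canada"]),
--     ("GBP", ["gbp", "£", "pound"]),
--     ("AED", ["aed", "dirham"]),
--     ("PLN", ["pln", "zl", "zł", "poland", "polska", "pl_"]),
-- ]
--
-- def _normalize_currency_token(raw: object) -> Optional[str]: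
--     if raw is None:
--         return None
--     text = str(raw).strip().upper()
--     if not text:
--         return None
--     compact = text.replace(" ", "").replace(".", "").replace(",", "")
--     if any(token in compact for token in ["PLN", "ZL", "ZŁ"]):
--         return "PLN"
--     if any(token in compact for token in ["EUR", "EURO", "€"]):
--         return "EUR"
--     if "USD" in compact or "$" in text:
--         return "USD"
--     if "CAD" in compact:
--         return "CAD"
--     if "GBP" in compact or "£" in text:
--         return "GBP"
--     if "AED" in compact:
--         return "AED"
--     return None
--
-- def _context_currency_hint(file_name: Optional[str], sheet_names: Sequence[str]) -> Optional[str]: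
--     candidates: List[str] = []
--     for source in [file_name] + list(sheet_names):
--         if not source:
--             continue
--         lower = str(source).lower()
--         for code, tokens in CONTEXT_HINTS:
--             for token in tokens:
--                 if token in lower:
--                     return code
--         normalized = _normalize_currency_token(source)
--         if normalized:
--             candidates.append(normalized)
--     return candidates[0] if candidates else None
-- ===== SOURCE B (Python) =====
-- from typing import List, Optional, Sequence, Tuple
--
-- CONTEXT_HINTS = [
--     ("EUR", ["eur", "euro", "€", "eu", " eu"]),
--     ("USD", ["usd", "dolar", "usd$", "$"]),
--     ("CAD", ["cad", "canada"]),
--     ("GBP", ["gbp", "£", "pound"]),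
--     ("AED", ["aed", "dirham"]),
--     ("PLN", ["pln", "zl", "zł", "poland", "polska", "pl_"]),
-- ]
--
-- # the hint tokens flattened once into a (token, code) lookup table
-- TOKEN_TABLE: List[Tuple[str, str]] = [
--     (token, code) for code, tokens in CONTEXT_HINTS for token in tokens
-- ]
--
-- # normalization rules, searched in the compacted upper-case text
-- NORM_RULES: List[Tuple[str, List[str]]] = [
--     ("PLN", ["PLN", "ZL", "ZŁ"]),
--     ("EUR", ["EUR", "EURO", "€"]),
--     ("USD", ["USD", "$"]),
--     ("CAD", ["CAD"]),
--     ("GBP", ["GBP", "£"]),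
--     ("AED", ["AED"]),
-- ]
--
-- def _compact_upper(source: str) -> str:
--     return "".join(ch for ch in str(source).strip().upper() if ch not in " .,")
--
-- def _context_currency_hint(file_name: Optional[str], sheet_names: Sequence[str]) -> Optional[str]:
--     sources = [s for s in [file_name, *list(sheet_names)] if s]
--     # pass 1: any lower-case hint token anywhere wins
--     for source in sources:
--         lowered = str(source).lower()
--         hit = next((code for token, code in TOKEN_TABLE if token in lowered), None)
--         if hit is not None:
--             return hit
--     # pass 2: first source whose compacted text names a currency
--     for source in sources:
--         compact = _compact_upper(source)
--         hit = next(
--             (code for code, toks in NORM_RULES for token in toks if token in compact),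
--             None,
--         )
--         if hit is not None:
--             return hit
--     return None
-- ===== Notes on version B (the rewrite author's own statement) =====
-- stated objective: alternative
-- what changed: Replaced A's single accumulating loop (early-return hint scan nested over CONTEXT_HINTS plus a candidates list for normalization results) with two sequential early-return passes over the pre-filtered sources, each driven by a flat (token, code) lookup table, and replaced the normalization if-chain by a table of rules searched in the compacted text.
import Mathlib
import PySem

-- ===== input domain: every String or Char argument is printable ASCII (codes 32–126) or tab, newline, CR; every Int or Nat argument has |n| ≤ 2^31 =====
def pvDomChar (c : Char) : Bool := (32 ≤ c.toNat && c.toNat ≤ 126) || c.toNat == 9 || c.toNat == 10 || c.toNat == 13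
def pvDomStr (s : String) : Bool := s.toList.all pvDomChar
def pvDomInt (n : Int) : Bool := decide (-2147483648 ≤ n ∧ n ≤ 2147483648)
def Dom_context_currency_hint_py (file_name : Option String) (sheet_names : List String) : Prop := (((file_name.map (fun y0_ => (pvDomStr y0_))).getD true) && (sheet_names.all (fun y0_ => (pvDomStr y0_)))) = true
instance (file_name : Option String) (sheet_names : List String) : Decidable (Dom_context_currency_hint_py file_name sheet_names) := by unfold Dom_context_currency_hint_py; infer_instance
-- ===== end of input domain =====

-- B re-decomposes A's single accumulating loop (with its candidates list and nested hint scan)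
-- into two early-return passes over the pre-filtered sources, each driven by a flat lookup table;
-- objective "alternative", return value identical.

-- ===== PORT A =====
-- module constant CONTEXT_HINTS
def CONTEXT_HINTS : List (String × List String) :=
  [("EUR", ["eur", "euro", "€", "eu", " eu"]),
   ("USD", ["usd", "dolar", "usd$", "$"]),
   ("CAD", ["cad", "canada"]),
   ("GBP", ["gbp", "£", "pound"]),
   ("AED", ["aed", "dirham"]),
   ("PLN", ["pln", "zl", "zł", "poland", "polska", "pl_"])]

-- A's helper _normalize_currency_token; A calls it only with a (truthy) str, so the
-- `raw is None` branch is unreachable and the parameter is String.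
def normalizeCurrencyToken (raw : String) : Option String :=
  let text := PySem.Str.upper (PySem.Str.strip raw)
  if text = "" then none
  else
    let compact := PySem.Str.replace (PySem.Str.replace (PySem.Str.replace text " " "") "." "") "," ""
    if ["PLN", "ZL", "ZŁ"].any (fun t => PySem.Str.isIn t compact) then some "PLN"
    else if ["EUR", "EURO", "€"].any (fun t => PySem.Str.isIn t compact) then some "EUR"
    else if PySem.Str.isIn "USD" compact || PySem.Str.isIn "$" text then some "USD"
    else if PySem.Str.isIn "CAD" compact then some "CAD"
    else if PySem.Str.isIn "GBP" compact || PySem.Str.isIn "£" text then some "GBP"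
    else if PySem.Str.isIn "AED" compact then some "AED"
    else none

-- inner 'for code, tokens in CONTEXT_HINTS: for token in tokens: if token in lower: return code'
def hintScan (hints : List (String × List String)) (lower : String) : Option String :=
  match hints with
  | [] => none
  | (code, tokens) :: rest =>
      if tokens.any (fun token => PySem.Str.isIn token lower) then some code
      else hintScan rest lower

-- A's main loop over the sources, carrying the `candidates` accumulator
def aLoop (sources : List (Option String)) (candidates : List String) : Option String :=
  match sources with
  | [] => candidates.head?          -- candidates[0] if candidates else None
  | src :: rest =>
      match src with
      | none => aLoop rest candidates            -- `if not source: continue`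
      | some s =>
          if s = "" then aLoop rest candidates   -- `if not source: continue`
          else
            match hintScan CONTEXT_HINTS (PySem.Str.lower s) with
            | some code => some code
            | none =>
                match normalizeCurrencyToken s with
                | some n => aLoop rest (candidates ++ [n])
                | none => aLoop rest candidates

def context_currency_hint_py (file_name : Option String) (sheet_names : List String) : Option String :=
  aLoop (file_name :: sheet_names.map some) []

-- ===== PORT B =====
-- TOKEN_TABLE = [(token, code) for code, tokens in CONTEXT_HINTS for token in tokens]
def TOKEN_TABLE : List (String × String) :=
  CONTEXT_HINTS.flatMap (fun p => p.2.map (fun token => (token, p.1)))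

-- NORM_RULES, searched in the compacted upper-case text
def NORM_RULES : List (String × List String) :=
  [("PLN", ["PLN", "ZL", "ZŁ"]),
   ("EUR", ["EUR", "EURO", "€"]),
   ("USD", ["USD", "$"]),
   ("CAD", ["CAD"]),
   ("GBP", ["GBP", "£"]),
   ("AED", ["AED"])]

-- _compact_upper: "".join(ch for ch in str(source).strip().upper() if ch not in " .,")
def compactUpper (source : String) : String :=
  String.ofList (((PySem.Str.upper (PySem.Str.strip source)).toList).filter
    (fun ch => !(ch == ' ' || ch == '.' || ch == ',')))

def context_currency_hint_py_alt (file_name : Option String) (sheet_names : List String) : Option String :=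
  -- sources = [s for s in [file_name, *list(sheet_names)] if s]
  let sources : List String := (file_name :: sheet_names.map some).filterMap
    (fun o => match o with | none => none | some s => if s = "" then none else some s)
  -- pass 1: next((code for token, code in TOKEN_TABLE if token in lowered), None)
  match sources.findSome? (fun s =>
      (TOKEN_TABLE.find? (fun tc => PySem.Str.isIn tc.1 (PySem.Str.lower s))).map (·.2)) with
  | some code => some code
  | none =>
      -- pass 2: next((code for code, toks in NORM_RULES for token in toks if token in compact), None)
      sources.findSome? (fun s =>
        ((NORM_RULES.flatMap (fun p => p.2.map (fun token => (p.1, token)))).find?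
          (fun ct => PySem.Str.isIn ct.2 (compactUpper s))).map (·.1))

-- ===== PRECONDITION & SPEC =====
def Spec_context_currency_hint_py (file_name : Option String) (sheet_names : List String) (out : Option String) : Prop := out = context_currency_hint_py_alt file_name sheet_names
instance (file_name : Option String) (sheet_names : List String) (out : Option String) : Decidable (Spec_context_currency_hint_py file_name sheet_names out) := by unfold Spec_context_currency_hint_py; infer_instance

-- ===== CLAIM (what is proved, stated in full; the proofs are below) =====
def Claim_equal_context_currency_hint_py : Prop := ∀ (file_name : Option String) (sheet_names : List String), Dom_context_currency_hint_py file_name sheet_names → Spec_context_currency_hint_py file_name sheet_names (context_currency_hint_py file_name sheet_names)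

-- ===== LEMMAS AND PROOFS =====


-- A's replace(old, "") with a single-char pattern is a filter (go runs on fuel = length)
theorem go_single (c : Char) : ∀ (fuel : Nat) (l acc : List Char), l.length ≤ fuel →
    PySem.Chars.replace.go [c] [] fuel l acc = acc.reverse ++ l.filter (fun x => x != c) := by
  intro fuel
  induction fuel with
  | zero =>
      intro l acc h
      have : l = [] := List.length_eq_zero_iff.mp (Nat.le_zero.mp h)
      subst this
      simp [PySem.Chars.replace.go]
  | succ n ih =>
      intro l acc h
      cases l with
      | nil => simp [PySem.Chars.replace.go]
      | cons a t =>
          rw [PySem.Chars.replace.go]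
          have ht : t.length ≤ n := by simpa using h
          by_cases hc : c = a
          · subst hc
            simp [List.isPrefixOf, ih t acc ht]
          · have hpre : List.isPrefixOf [c] (a :: t) = false := by
              simp [List.isPrefixOf, hc]
            simp [hpre, ih t (a :: acc) ht, Ne.symm hc]

theorem replace_single (c : Char) (l : List Char) :
    PySem.Chars.replace l [c] [] = l.filter (fun x => x != c) := by
  rw [PySem.Chars.replace]
  simp [go_single c l.length l [] le_rfl]

def charsCompact (l : List Char) : List Char :=
  l.filter (fun ch => !(ch == ' ' || ch == '.' || ch == ','))

theorem A_compact (text : String) :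
    (PySem.Str.replace (PySem.Str.replace (PySem.Str.replace text " " "") "." "") "," "").toList
      = charsCompact text.toList := by
  simp [PySem.Str.toList_replace, replace_single, charsCompact, List.filter_filter]
  apply List.filter_congr
  intro x _
  cases h1 : x == ' ' <;> cases h2 : x == '.' <;> cases h3 : x == ',' <;> simp_all [bne]

theorem isIn_single_compact (c : Char) (h : (c == ' ' || c == '.' || c == ',') = false)
    (l : List Char) : PySem.Chars.isIn [c] (charsCompact l) = PySem.Chars.isIn [c] l := by
  rcases h1 : PySem.Chars.isIn [c] l with _ | _
  · have := (PySem.Chars.isIn_eq_false_iff _ _).mp h1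
    rcases h2 : PySem.Chars.isIn [c] (charsCompact l) with _ | _
    · rfl
    · exact absurd ((List.singleton_infix_iff c l).mpr
        (List.mem_of_mem_filter ((List.singleton_infix_iff c (charsCompact l)).mp
          ((PySem.Chars.isIn_iff_infix _ _).mp h2)))) this
  · apply (PySem.Chars.isIn_iff_infix _ _).mpr
    apply (List.singleton_infix_iff c (charsCompact l)).mpr
    exact List.mem_filter.mpr ⟨(List.singleton_infix_iff c l).mp
      ((PySem.Chars.isIn_iff_infix _ _).mp h1), by simp [h]⟩


-- the RHS-form compact used by B, on the char-list side
theorem compactUpper_toList (s : String) :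
    (compactUpper s).toList = charsCompact (PySem.Str.upper (PySem.Str.strip s)).toList := by
  simp only [compactUpper, charsCompact, String.toList_ofList]

-- flat (token, code) table lookup over one hint group
theorem table_block (code : String) (tokens : List String) (lower : String) :
    ((tokens.map (fun t => (t, code))).find? (fun tc => PySem.Str.isIn tc.1 lower)).map (·.2)
      = if tokens.any (fun t => PySem.Str.isIn t lower) then some code else none := by
  induction tokens with
  | nil => simp
  | cons t ts ih =>
      by_cases h : PySem.Str.isIn t lower = true
      · rw [List.map_cons,
          List.find?_cons_of_pos (p := fun tc : String × String => PySem.Str.isIn tc.1 lower)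
            (a := (t, code)) h]
        simp [List.any_cons, h, -PySem.Str.isIn_eq]
      · rw [List.map_cons,
          List.find?_cons_of_neg (p := fun tc : String × String => PySem.Str.isIn tc.1 lower)
            (a := (t, code)) (by simpa [-PySem.Str.isIn_eq] using h), ih]
        simp [List.any_cons, Bool.eq_false_iff.mpr h, -PySem.Str.isIn_eq]

-- flat table lookup = A's nested hint scan
theorem table_eq (hints : List (String × List String)) (lower : String) :
    ((hints.flatMap (fun p => p.2.map (fun token => (token, p.1)))).find?
      (fun tc => PySem.Str.isIn tc.1 lower)).map (·.2) = hintScan hints lower := by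
  induction hints with
  | nil => simp [hintScan]
  | cons p rest ih =>
      rw [List.flatMap_cons, List.find?_append, Option.map_or, table_block, ih]
      by_cases h : p.2.any (fun t => PySem.Str.isIn t lower) = true <;>
        simp [hintScan, h, Option.or, -PySem.Str.isIn_eq]

-- flat (code, token) rule lookup over one rule group
theorem norm_block (code : String) (toks : List String) (compact : String) :
    ((toks.map (fun token => (code, token))).find? (fun ct => PySem.Str.isIn ct.2 compact)).map (·.1)
      = if toks.any (fun t => PySem.Str.isIn t compact) then some code else none := by
  induction toks with
  | nil => simp
  | cons t ts ih =>
      by_cases h : PySem.Str.isIn t compact = true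
      · rw [List.map_cons,
          List.find?_cons_of_pos (p := fun ct : String × String => PySem.Str.isIn ct.2 compact)
            (a := (code, t)) h]
        simp [List.any_cons, h, -PySem.Str.isIn_eq]
      · rw [List.map_cons,
          List.find?_cons_of_neg (p := fun ct : String × String => PySem.Str.isIn ct.2 compact)
            (a := (code, t)) (by simpa [-PySem.Str.isIn_eq] using h), ih]
        simp [List.any_cons, Bool.eq_false_iff.mpr h, -PySem.Str.isIn_eq]

-- flat rule-table lookup = group-wise scan (hintScan's shape, reused as the generic scanner)
theorem norm_table_eq (rules : List (String × List String)) (compact : String) :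
    ((rules.flatMap (fun p => p.2.map (fun token => (p.1, token)))).find?
      (fun ct => PySem.Str.isIn ct.2 compact)).map (·.1) = hintScan rules compact := by
  induction rules with
  | nil => simp [hintScan]
  | cons p rest ih =>
      rw [List.flatMap_cons, List.find?_append, Option.map_or, norm_block, ih]
      by_cases h : p.2.any (fun t => PySem.Str.isIn t compact) = true <;>
        simp [hintScan, h, Option.or, -PySem.Str.isIn_eq]

-- B's table-driven normalization = A's normalization chain
theorem norm_eq (s : String) :
    ((NORM_RULES.flatMap (fun p => p.2.map (fun token => (p.1, token)))).find?
        (fun ct => PySem.Str.isIn ct.2 (compactUpper s))).map (·.1)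
      = normalizeCurrencyToken s := by
  rw [norm_table_eq]
  by_cases htext : PySem.Str.upper (PySem.Str.strip s) = ""
  · have h0 : (compactUpper s).toList = ([] : List Char) := by
      rw [compactUpper_toList, htext]; rfl
    have hc : compactUpper s = "" := by
      rw [← String.ofList_toList (s := compactUpper s), h0]
    rw [hc]
    have hnone : hintScan NORM_RULES "" = none := by decide
    simp [hnone, normalizeCurrencyToken, htext]
  · have key : ∀ t : String,
        PySem.Str.isIn t (PySem.Str.replace (PySem.Str.replace (PySem.Str.replace
          (PySem.Str.upper (PySem.Str.strip s)) " " "") "." "") "," "")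
          = PySem.Str.isIn t (compactUpper s) := by
      intro t
      rw [PySem.Str.isIn_eq, PySem.Str.isIn_eq, A_compact, compactUpper_toList]
    have ksingle : ∀ (c : Char), (c == ' ' || c == '.' || c == ',') = false →
        PySem.Str.isIn (String.ofList [c]) (PySem.Str.upper (PySem.Str.strip s))
          = PySem.Str.isIn (String.ofList [c]) (compactUpper s) := by
      intro c hcc
      rw [PySem.Str.isIn_eq, PySem.Str.isIn_eq, compactUpper_toList, String.toList_ofList,
        isIn_single_compact c hcc]
    have kdol : PySem.Str.isIn "$" (PySem.Str.upper (PySem.Str.strip s))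
        = PySem.Str.isIn "$" (compactUpper s) := by
      have h1 : "$" = String.ofList ['$'] := rfl
      rw [h1]; exact ksingle '$' (by decide)
    have kpnd : PySem.Str.isIn "£" (PySem.Str.upper (PySem.Str.strip s))
        = PySem.Str.isIn "£" (compactUpper s) := by
      have h1 : "£" = String.ofList ['£'] := rfl
      rw [h1]; exact ksingle '£' (by decide)
    simp [normalizeCurrencyToken, if_neg htext, hintScan, NORM_RULES, key, kdol, kpnd,
      -PySem.Str.isIn_eq]

def srcFilter (l : List (Option String)) : List String :=
  l.filterMap (fun o => match o with | none => none | some s => if s = "" then none else some s)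

-- A's accumulating loop: hint hit anywhere, else first carried candidate, else first normalization
theorem aLoop_eq : ∀ (l : List (Option String)) (c : List String),
    aLoop l c = ((srcFilter l).findSome? (fun s => hintScan CONTEXT_HINTS (PySem.Str.lower s))).or
      ((c.head?).or ((srcFilter l).findSome? (fun s => normalizeCurrencyToken s))) := by
  intro l
  induction l with
  | nil => intro c; simp [aLoop, srcFilter]
  | cons src rest ih =>
      intro c
      cases src with
      | none => simpa [aLoop, srcFilter] using ih c
      | some s =>
          by_cases hs : s = ""
          · simpa [aLoop, srcFilter, hs] using ih c
          · have hsrc : srcFilter (some s :: rest) = s :: srcFilter rest := by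
              simp [srcFilter, hs]
            rw [hsrc]
            cases hScan : hintScan CONTEXT_HINTS (PySem.Str.lower s) with
            | some code => simp [aLoop, hs, hScan, List.findSome?_cons]
            | none =>
                cases hN : normalizeCurrencyToken s with
                | some n =>
                    simp [aLoop, hs, hScan, hN, ih, List.head?_append]
                | none => simp [aLoop, hs, hScan, hN, ih]


-- ===== VERDICT (by name: the statement is the Claim_ definition above) =====
theorem context_currency_hint_py_spec : Claim_equal_context_currency_hint_py := by
  intro file_name sheet_names _
  unfold Spec_context_currency_hint_py context_currency_hint_py context_currency_hint_py_alt
  rw [aLoop_eq]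
  have hs : (List.filterMap
      (fun o => match o with | none => none | some s => if s = "" then none else some s)
      (file_name :: sheet_names.map some)) = srcFilter (file_name :: sheet_names.map some) := rfl
  simp only [TOKEN_TABLE, table_eq, norm_eq, hs]
  cases h : (srcFilter (file_name :: sheet_names.map some)).findSome?
      (fun s => hintScan CONTEXT_HINTS (PySem.Str.lower s)) <;>
    simp [h, Option.or]
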